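-- pv_equiv track=rewrite | github.com/f-bandet/ISTA-131 | hw1.py | indices_biggest
-- ===== SOURCE A (Python) =====
-- def indices_biggest(matrix):
--     '''
--     This function returns a list containing the indices of the largest value in its sole
--     argument, a nonempty matrix, matrix.  If there is only one element in the matrix,
--     return [0, 0].If there are multiples of the same max value, return the first occurrence going from left
--     to right and then down the matrix.
--     '''
--     indices = [0,0]
--     biggest = matrix[0][0]
--     if len(matrix) == 1 and len(matrix[0]) == 1:
--         return indices
--     for row in range(len(matrix)):
--         for column in range(len(matrix[0])):
--             if matrix[row][column] > biggest:
--                 biggest = matrix[row][column]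
--                 indices = [row, column]
--     return indices
-- ===== SOURCE B (Python) =====
-- def indices_biggest(matrix):
--     ncols = len(matrix[0])
--     best = max(matrix[r][c] for r in range(len(matrix)) for c in range(ncols))
--     for r in range(len(matrix)):
--         for c in range(ncols):
--             if matrix[r][c] == best:
--                 return [r, c]
-- ===== Notes on version B (the rewrite author's own statement) =====
-- stated objective: alternative
-- what changed: Replaces A's single fused scan that threads a running (indices, biggest) pair through nested loops with two separate passes: compute the maximum with the built-in max() over the flattened value sequence, then return the first [row, column] whose value equals it.
import Mathlib
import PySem

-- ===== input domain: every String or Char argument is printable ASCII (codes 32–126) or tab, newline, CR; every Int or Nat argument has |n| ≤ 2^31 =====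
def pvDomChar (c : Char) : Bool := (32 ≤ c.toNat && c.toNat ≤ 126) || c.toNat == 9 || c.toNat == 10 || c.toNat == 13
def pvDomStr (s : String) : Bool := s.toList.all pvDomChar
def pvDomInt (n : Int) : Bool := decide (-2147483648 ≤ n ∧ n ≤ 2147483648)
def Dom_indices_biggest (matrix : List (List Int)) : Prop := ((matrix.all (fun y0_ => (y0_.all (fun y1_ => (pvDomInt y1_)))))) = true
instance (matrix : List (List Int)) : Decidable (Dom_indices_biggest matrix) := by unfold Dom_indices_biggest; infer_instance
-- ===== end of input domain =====

-- B replaces A's single fused max-tracking scan by two passes (compute the max, then locate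
-- its first occurrence in the same scan order); objective: alternative decomposition, same cost.

-- ===== PORT A =====
-- Literal port of A: indices/biggest state threaded through the nested range loops.
-- pyGetD with defaults is exact here because Pre_ keeps every index in range.
def indices_biggest (matrix : List (List Int)) : List Int :=
  match PySem.List.pyGet? matrix 0 with
  | none => []          -- matrix[0] raises IndexError; excluded by Pre_
  | some row0 =>
    match PySem.List.pyGet? row0 0 with
    | none => []        -- matrix[0][0] raises IndexError; excluded by Pre_
    | some b0 =>
      if matrix.length = 1 ∧ row0.length = 1 then [0, 0]
      else
        let r :=
          (PySem.List.pyRange 0 (matrix.length : Int) 1).foldl (fun st row =>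
            (PySem.List.pyRange 0 (row0.length : Int) 1).foldl (fun (st : List Int × Int) column =>
              let v := PySem.List.pyGetD (PySem.List.pyGetD matrix row []) column 0
              if v > st.2 then ([row, column], v) else st) st)
            ([0, 0], b0)
        r.1

-- ===== PORT B =====
-- Literal port of Source B: pass 1 computes max() over the generator's flat value sequence,
-- pass 2 returns the first [r, c] whose value equals it.
def indices_biggest_alt (matrix : List (List Int)) : List Int :=
  match PySem.List.pyGet? matrix 0 with
  | none => []          -- matrix[0] raises IndexError; excluded by Pre_
  | some row0 =>
    let ncols : Int := (row0.length : Int)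
    let vals :=
      (PySem.List.pyRange 0 (matrix.length : Int) 1).flatMap (fun r =>
        (PySem.List.pyRange 0 ncols 1).map (fun c =>
          PySem.List.pyGetD (PySem.List.pyGetD matrix r []) c 0))
    match PySem.List.max? vals (fun v => v) with
    | none => []        -- max() of an empty sequence raises ValueError; excluded by Pre_
    | some best =>
      ((PySem.List.pyRange 0 (matrix.length : Int) 1).findSome? (fun r =>
        (PySem.List.pyRange 0 ncols 1).findSome? (fun c =>
          if PySem.List.pyGetD (PySem.List.pyGetD matrix r []) c 0 = best
          then some [r, c] else none))).getD []

-- ===== PRECONDITION & SPEC =====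
-- Pre_ excludes exactly the inputs where A raises IndexError: the empty matrix, an empty
-- first row, and ragged matrices with some row shorter than the first (matrix[row][column]
-- with column < len(matrix[0]) out of range).
def Pre_indices_biggest (matrix : List (List Int)) : Prop :=
  matrix ≠ [] ∧ matrix.headD [] ≠ [] ∧ ∀ row ∈ matrix, (matrix.headD []).length ≤ row.length
instance (matrix : List (List Int)) : Decidable (Pre_indices_biggest matrix) := by
  unfold Pre_indices_biggest; infer_instance

def pvWitness_indices_biggest : List (List Int) := [[1, 5], [5, 2]]

def Spec_indices_biggest (matrix : List (List Int)) (out : List Int) : Prop := out = indices_biggest_alt matrix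
instance (matrix : List (List Int)) (out : List Int) : Decidable (Spec_indices_biggest matrix out) := by unfold Spec_indices_biggest; infer_instance

-- ===== CLAIM (what is proved, stated in full; the proofs are below) =====
def Claim_equal_indices_biggest : Prop := ∀ (matrix : List (List Int)), Dom_indices_biggest matrix → Pre_indices_biggest matrix → Spec_indices_biggest matrix (indices_biggest matrix)

-- ===== LEMMAS AND PROOFS =====

-- The flat list of scanned cells, in A's (and B's) scan order: (index pair, value).
def pvCells (matrix : List (List Int)) (m : Nat) : List (List Int × Int) :=
  (List.range matrix.length).flatMap (fun (r : Nat) =>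
    (List.range m).map (fun (c : Nat) => (([(r : Int), (c : Int)] : List Int), (matrix.getD r []).getD c 0)))

-- A's fused update step.
def pvStep (st : List Int × Int) (p : List Int × Int) : List Int × Int :=
  if p.2 > st.2 then (p.1, p.2) else st

def pvMax (b0 : Int) (ps : List (List Int × Int)) : Int :=
  ps.foldl (fun m p => max m p.2) b0

theorem pvMax_le (b0 : Int) (ps : List (List Int × Int)) :
    b0 ≤ pvMax b0 ps ∧ ∀ p ∈ ps, p.2 ≤ pvMax b0 ps := by
  induction ps generalizing b0 with
  | nil => simp [pvMax]
  | cons p ps ih =>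
    have h := ih (max b0 p.2)
    have hc : pvMax b0 (p :: ps) = pvMax (max b0 p.2) ps := by simp [pvMax]
    constructor
    · rw [hc]; exact le_trans (le_max_left _ _) h.1
    · intro q hq
      rw [List.mem_cons] at hq
      rw [hc]
      rcases hq with rfl | hq
      · exact le_trans (le_max_right b0 q.2) h.1
      · exact h.2 q hq

theorem pvMax_attained (b0 : Int) (ps : List (List Int × Int)) (h : pvMax b0 ps ≠ b0) :
    ∃ p ∈ ps, p.2 = pvMax b0 ps := by
  induction ps generalizing b0 with
  | nil => simp [pvMax] at h
  | cons p ps ih =>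
    by_cases hm : pvMax (max b0 p.2) ps = max b0 p.2
    · have hM : pvMax b0 (p :: ps) = max b0 p.2 := by simpa [pvMax] using hm
      rcases max_choice b0 p.2 with hc | hc
      · exact absurd (hM.trans hc) h
      · exact ⟨p, List.mem_cons_self, by rw [hM, hc]⟩
    · rcases ih (max b0 p.2) hm with ⟨q, hq, hq2⟩
      exact ⟨q, List.mem_cons_of_mem _ hq, by simpa [pvMax] using hq2⟩

-- Characterisation of A's fused scan: it ends at the first cell whose value is the running
-- maximum and strictly exceeds the start value, or stays at the start.
theorem pvFind?_congr {A : Type} (l : List A) (p q : A → Bool)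
    (h : ∀ x ∈ l, p x = q x) : l.find? p = l.find? q := by
  induction l with
  | nil => rfl
  | cons a l ih =>
    have ha := h a List.mem_cons_self
    by_cases hp : p a = true
    · rw [List.find?_cons_of_pos hp, List.find?_cons_of_pos (ha ▸ hp)]
    · rw [List.find?_cons_of_neg hp, List.find?_cons_of_neg (by rw [← ha]; exact hp)]
      exact ih fun x hx => h x (List.mem_cons_of_mem _ hx)

-- Characterisation of A's fused scan: it ends at the first cell whose value is the running
-- maximum and strictly exceeds the start value, or stays at the start.
theorem pvScan_eq (ps : List (List Int × Int)) (i0 : List Int) (b0 : Int) :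
    ps.foldl pvStep (i0, b0) =
      match ps.find? (fun p => decide (b0 < p.2) && decide (p.2 = pvMax b0 ps)) with
      | some p => p
      | none => (i0, b0) := by
  induction ps generalizing i0 b0 with
  | nil => simp
  | cons p ps ih =>
    have hMcons : pvMax b0 (p :: ps) = pvMax (max b0 p.2) ps := by simp [pvMax]
    by_cases hgt : p.2 > b0
    · have hmax : max b0 p.2 = p.2 := max_eq_right (le_of_lt hgt)
      have hstep : (p :: ps).foldl pvStep (i0, b0) = ps.foldl pvStep (p.1, p.2) := by
        simp [pvStep, hgt]
      rw [hstep, ih]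
      by_cases heq : p.2 = pvMax b0 (p :: ps)
      · -- head attains the maximum: find? fires at the head, the scan never updates again
        have hpm : p.2 = pvMax p.2 ps := by
          conv_lhs => rw [heq]
          rw [hMcons, hmax]
        have hnone : ps.find? (fun q => decide (p.2 < q.2) && decide (q.2 = pvMax p.2 ps)) = none := by
          rw [List.find?_eq_none]
          intro q hq
          have hle : q.2 ≤ pvMax (max b0 p.2) ps := (pvMax_le _ _).2 q hq
          rw [hmax] at hle
          simp only [Bool.and_eq_true, decide_eq_true_eq, not_and]
          intro hlt'; omega
        rw [hnone, List.find?_cons_of_pos (by simp [← heq, hgt])]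
      · -- head below the maximum: the two find? predicates agree elementwise on ps
        have hM : pvMax b0 (p :: ps) = pvMax p.2 ps := by rw [hMcons, hmax]
        have hlt : p.2 < pvMax p.2 ps := by
          have h1 : p.2 ≤ pvMax p.2 ps := (pvMax_le _ _).1
          have h2 : p.2 ≠ pvMax p.2 ps := fun hc => heq (by rw [hM]; exact hc)
          omega
        rw [List.find?_cons_of_neg (by simp [heq]), hM]
        have hcong : ps.find? (fun q => decide (p.2 < q.2) && decide (q.2 = pvMax p.2 ps))
            = ps.find? (fun q => decide (b0 < q.2) && decide (q.2 = pvMax p.2 ps)) := by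
          apply pvFind?_congr
          intro q _
          by_cases hq : q.2 = pvMax p.2 ps
          · rw [hq]; simp [hlt, lt_trans hgt hlt]
          · simp [hq]
        rw [hcong]
        -- the none case is impossible: the maximum is attained in ps
        rcases hfind : ps.find? (fun q => decide (b0 < q.2) && decide (q.2 = pvMax p.2 ps)) with _ | w
        · exfalso
          rcases pvMax_attained p.2 ps (by omega) with ⟨q, hq, hq2⟩
          rw [List.find?_eq_none] at hfind
          have hthis := hfind q hq
          simp only [Bool.and_eq_true, decide_eq_true_eq, not_and] at hthis
          exact hthis (by omega) hq2
        · rw [hfind]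
    · have hmax : max b0 p.2 = b0 := max_eq_left (by omega)
      have hstep : (p :: ps).foldl pvStep (i0, b0) = ps.foldl pvStep (i0, b0) := by
        simp [pvStep, hgt]
      rw [hstep, ih, List.find?_cons_of_neg (by simp [hgt]), hMcons, hmax]

theorem pvScan_fst (i0 : List Int) (b0 : Int) (tl : List (List Int × Int)) :
    (((i0, b0) :: tl).foldl pvStep (i0, b0)).1 =
      match ((i0, b0) :: tl).find? (fun p => decide (p.2 = pvMax b0 ((i0, b0) :: tl))) with
      | some p => p.1
      | none => i0 := by
  rw [pvScan_eq]
  by_cases hb : pvMax b0 ((i0, b0) :: tl) = b0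
  · have hnone : ((i0, b0) :: tl).find?
        (fun p => decide (b0 < p.2) && decide (p.2 = pvMax b0 ((i0, b0) :: tl))) = none := by
      rw [List.find?_eq_none]
      intro q hq
      have hle := (pvMax_le b0 ((i0, b0) :: tl)).2 q hq
      simp only [Bool.and_eq_true, decide_eq_true_eq, not_and]
      intro hlt; omega
    rw [hnone, List.find?_cons_of_pos (by simp [hb])]
  · have hlt : b0 < pvMax b0 ((i0, b0) :: tl) :=
      lt_of_le_of_ne (pvMax_le b0 ((i0, b0) :: tl)).1 (Ne.symm hb)
    rw [pvFind?_congr ((i0, b0) :: tl)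
        (fun p => decide (b0 < p.2) && decide (p.2 = pvMax b0 ((i0, b0) :: tl)))
        (fun p => decide (p.2 = pvMax b0 ((i0, b0) :: tl)))
        (fun q _ => by
          by_cases hq : q.2 = pvMax b0 ((i0, b0) :: tl)
          · simp [hq, hlt]
          · simp [hq])]
    rcases hf : ((i0, b0) :: tl).find? (fun p => decide (p.2 = pvMax b0 ((i0, b0) :: tl))) with _ | w
    · rw [hf]
    · rw [hf]

-- max() of a nonempty list of ints is its running maximum
theorem pvMax?_go (vs : List Int) (v : Int) :
    PySem.List.max? (v :: vs) (fun x => x) = some (vs.foldl max v) := by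
  induction vs generalizing v with
  | nil => rfl
  | cons x vs ih =>
    have h1 : PySem.List.max? (v :: x :: vs) (fun y => y) =
        PySem.List.max? (max v x :: vs) (fun y => y) := by
      simp only [PySem.List.max?, List.foldl_cons]
      congr 1
      split_ifs with h
      · rw [max_eq_right (le_of_lt h)]
      · rw [max_eq_left (by omega)]
    rw [h1, ih, List.foldl_cons]

theorem pvMax?_map_snd (i0 : List Int) (b0 : Int) (tl : List (List Int × Int)) :
    PySem.List.max? (((i0, b0) :: tl).map Prod.snd) (fun v => v) =
      some (pvMax b0 ((i0, b0) :: tl)) := by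
  have h1 : pvMax b0 ((i0, b0) :: tl) = (tl.map Prod.snd).foldl max b0 := by
    simp [pvMax, List.foldl_map]
  rw [List.map_cons, h1]
  exact pvMax?_go (tl.map Prod.snd) b0

theorem pvFindSome?_flatMap {A B C : Type} (l : List A) (f : A → List B) (g : B → Option C) :
    (l.flatMap f).findSome? g = l.findSome? (fun x => (f x).findSome? g) := by
  induction l with
  | nil => rfl
  | cons a l ih =>
    rw [List.flatMap_cons, List.findSome?_append, ih, List.findSome?_cons]
    rcases h : (f a).findSome? g with _ | c <;> simp [Option.or]

theorem pvFindSome?_if (l : List (List Int × Int)) (p : List Int × Int → Bool) :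
    l.findSome? (fun x => if p x then some x.1 else none) = (l.find? p).map (·.1) := by
  induction l with
  | nil => rfl
  | cons a l ih =>
    by_cases hp : p a = true
    · simp [hp]
    · simp only [Bool.not_eq_true] at hp
      simp [hp, ih]

-- ===== VERDICT (by name: the statement is the Claim_ definition above) =====
theorem indices_biggest_spec : Claim_equal_indices_biggest := by
  intro matrix _ hpre
  unfold Spec_indices_biggest
  obtain ⟨hne, hh, hlen⟩ := hpre
  cases matrix with
  | nil => exact absurd rfl hne
  | cons row0 rest =>
    cases row0 with
    | nil => exact absurd rfl hh
    | cons b0 t =>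
      have hcells : ∃ tl, pvCells ((b0 :: t) :: rest) (b0 :: t).length = ([0, 0], b0) :: tl := by
        apply List.head?_eq_some_iff.mp
        simp only [pvCells, List.length_cons, List.range_succ_eq_map, List.flatMap_cons,
          List.map_cons, List.cons_append, Nat.cast_zero, List.getD_cons_zero, List.head?_cons]
      obtain ⟨tl, htl⟩ := hcells
      have hsome : ∃ w, (pvCells ((b0 :: t) :: rest) (b0 :: t).length).find?
          (fun p => decide (p.2 = pvMax b0 (pvCells ((b0 :: t) :: rest) (b0 :: t).length))) = some w := by
        by_cases hb : pvMax b0 (pvCells ((b0 :: t) :: rest) (b0 :: t).length) = b0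
        · refine ⟨([0, 0], b0), ?_⟩
          rw [htl] at hb ⊢
          rw [List.find?_cons_of_pos (by simp [hb])]
        · obtain ⟨q, hq, hq2⟩ := pvMax_attained b0 _ hb
          rcases hf : (pvCells ((b0 :: t) :: rest) (b0 :: t).length).find?
              (fun p => decide (p.2 = pvMax b0 (pvCells ((b0 :: t) :: rest) (b0 :: t).length))) with _ | w
          · rw [List.find?_eq_none] at hf
            exact absurd hq2 (by simpa using hf q hq)
          · exact ⟨w, hf⟩
      obtain ⟨w, hw⟩ := hsome
      have h1 : PySem.List.pyGet? ((b0 :: t) :: rest) 0 = some (b0 :: t) := by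
        simp [PySem.List.pyGet?, PySem.List.pyIdx?]
      have h2 : PySem.List.pyGet? (b0 :: t) 0 = some b0 := by
        simp [PySem.List.pyGet?, PySem.List.pyIdx?]
      have hA : indices_biggest ((b0 :: t) :: rest) = w.1 := by
        by_cases hone : ((b0 :: t) :: rest).length = 1 ∧ (b0 :: t).length = 1
        · obtain ⟨ho1, ho2⟩ := hone
          have hrest : rest = [] := by simpa using ho1
          have ht : t = [] := by simpa using ho2
          subst hrest; subst ht
          have hcv : pvCells [[b0]] [b0].length = [([0, 0], b0)] := by
            simp [pvCells, List.range_one]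
          rw [hcv] at hw
          have hMx : pvMax b0 [([0, 0], b0)] = b0 := by simp [pvMax]
          rw [hMx] at hw
          rw [List.find?_cons_of_pos (by simp)] at hw
          cases hw
          simp [indices_biggest, PySem.List.pyGet?, PySem.List.pyIdx?]
        · have hfold : ∀ init : List Int × Int,
              (pvCells ((b0 :: t) :: rest) (b0 :: t).length).foldl pvStep init =
              (PySem.List.pyRange 0 ((((b0 :: t) :: rest).length : Nat) : Int) 1).foldl (fun st row =>
                (PySem.List.pyRange 0 (((b0 :: t).length : Nat) : Int) 1).foldl
                  (fun (st : List Int × Int) column =>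
                    let v := PySem.List.pyGetD (PySem.List.pyGetD ((b0 :: t) :: rest) row []) column 0
                    if v > st.2 then ([row, column], v) else st) st) init := by
            intro init
            simp only [PySem.List.pyRange_zero_natCast, List.foldl_map, PySem.List.pyGetD_natCast,
              pvCells, List.foldl_flatMap, pvStep]
          simp only [indices_biggest, h1, h2]
          rw [if_neg hone, ← hfold, htl, pvScan_fst, ← htl, hw]
      have hB : indices_biggest_alt ((b0 :: t) :: rest) = w.1 := by
        have hvals : (PySem.List.pyRange 0 ((((b0 :: t) :: rest).length : Nat) : Int) 1).flatMap (fun r =>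
            (PySem.List.pyRange 0 (((b0 :: t).length : Nat) : Int) 1).map (fun c =>
              PySem.List.pyGetD (PySem.List.pyGetD ((b0 :: t) :: rest) r []) c 0)) =
            (pvCells ((b0 :: t) :: rest) (b0 :: t).length).map Prod.snd := by
          simp only [pvCells, PySem.List.pyRange_zero_natCast, List.map_flatMap, List.map_map,
            PySem.List.pyGetD_natCast, List.flatMap_map, Function.comp_def]
        have hfs : (PySem.List.pyRange 0 ((((b0 :: t) :: rest).length : Nat) : Int) 1).findSome? (fun r =>
            (PySem.List.pyRange 0 (((b0 :: t).length : Nat) : Int) 1).findSome? (fun c =>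
              if PySem.List.pyGetD (PySem.List.pyGetD ((b0 :: t) :: rest) r []) c 0 =
                  pvMax b0 (pvCells ((b0 :: t) :: rest) (b0 :: t).length)
              then some [r, c] else none)) =
            ((pvCells ((b0 :: t) :: rest) (b0 :: t).length).find?
              (fun p => decide (p.2 = pvMax b0 (pvCells ((b0 :: t) :: rest) (b0 :: t).length)))).map (·.1) := by
          rw [← pvFindSome?_if (pvCells ((b0 :: t) :: rest) (b0 :: t).length)
            (fun p => decide (p.2 = pvMax b0 (pvCells ((b0 :: t) :: rest) (b0 :: t).length)))]
          simp only [pvCells, PySem.List.pyRange_zero_natCast, List.findSome?_map,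
            pvFindSome?_flatMap, PySem.List.pyGetD_natCast, Function.comp_def, decide_eq_true_eq]
        simp only [indices_biggest_alt, h1]
        rw [hvals, htl, pvMax?_map_snd, ← htl]
        change (List.findSome? _ _).getD [] = w.1
        rw [hfs, hw]
        rfl
      rw [hA, hB]
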